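/- GENERATED by tools/from_farm_form.py from prooffarm-gif/accepted/gif_decode.1/Lemmas.lean (a worked proof of the farm's unit `gif_decode.1`,
   accepted by the verdict) — do not edit. -/
import Gif.Spec.Units.gif_decode_1
import Gif.Spec.AllSegs

/-!
  Lemmas for the unit `gif_decode.1` (0x10adda … 0x10aeb3, 41 instructions; gif_driver.c:183-197): a body segment of the driver's
  protected function AT HEAP LEVEL (no forest, no `Env`): the unchecked store `error = 0` into the own frame, then thirteen times
  `lea rdi, [rbx+k] ; call __asan_store{4,8}_noabort ; mov [rbx+k], imm` into the caller's report.

      gd1_seg_fill     0x10adda (`Body`) … 0x10aeb3 (`Filled`): ONE walk (about a minute), no contract call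

  THE TREE'S LEMMAS IT USES (nothing general is proved here):
      gif_decode.report_above, .reportLive   the report lies at or above RA + 8 and is live with the own frame pushed   Seg_gif_decode.lean
      HeapInv.stack_windows                  `HeapInv` through the check calls' return addresses and the report         FrameCarry.lean §5
      gif_decode.Core.carry                  `Core` at the exit from ONE footprint of `gif_decode.BodyWin`s             DriverCarry.lean §2
-/

open X86 X86.User Asan ProgX.Base ProgX.Base.Spec Gif.Spec

set_option maxRecDepth 4000
set_option maxHeartbeats 4000000

namespace Gif.Spec.gif_decode_1

/-- **10ADDAH … 10AEB3H** (gif_driver.c:183-197): `error = 0` (`[rsp+0x30]` = RA − 88, the own frame's object, unchecked); thirteen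
checked stores of the report's defaults (`report + 0, 4, … 36`: 4 bytes; `report + 40, 48, 56`: 8 bytes). Every check: the report is
live for the heap `H` with the own frame pushed (`gif_decode.reportLive`), no store so far went to the shadow. At the exit: the 27
stores (one local, thirteen return addresses at RA − 144, thirteen fields of the report) lie in the stack region: `HeapInv` by
`HeapInv.stack_windows`, `Core` by `Core.carry`; `rbp` (= `n`) is never written. -/
theorem gd1_seg_fill (Lay : Layout) (hLay : Lay.hi = 0x1000000) (μ : Microarch) (hμ : UserX.MicroOK μ) (u₀ : State)
    (hcode : HasCodeNat Lay u₀ Gif.L.gif_decode.entry Gif.Code.code_gif_decode.nat Gif.L.gif_decode.size)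
    (H : Heap) (rest : List Obj) (frames : List (Nat × FrameLayout)) (e : State) (ret : Word)
    (h_asan_store4_noabort : Asan.SmallCheck Lay μ ProgX.Base.WayInv (ProgX.Base.CodeOK u₀) [.rax, .rcx, .rdx] 4
      ProgX.Base.L.__asan_store4_noabort.entry)
    (h_asan_store8_noabort : Asan.SmallCheck Lay μ ProgX.Base.WayInv (ProgX.Base.CodeOK u₀) [.rax, .rcx, .rdx] 8
      ProgX.Base.L.__asan_store8_noabort.entry)
    (v : State) (hat : gif_decode.Body H rest frames u₀ e ret v) :
    ReachVia Lay μ ProgX.Base.WayInv v (gif_decode.Filled H rest frames u₀ e ret) := by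
  -- 1. THE PRELUDE OF A HEAP-LEVEL BODY SEGMENT: `Core` stays whole (fields by projection), only its `pre` is taken apart
  obtain ⟨hcore, c_rbp, c_rdx, hinv⟩ := hat
  have he := hcore.entry
  v_entry he
  have hpre := hcore.pre
  obtain ⟨hheap, hglob, hconsts0, hin, hrep, hrep_lo, hrep_hi⟩ := hcore.pre
  have w_rip := hcore.rip
  have c_rsp : v.reg .rsp = e.reg .rsp - 136 := hcore.rsp
  have c_rbx : v.reg .rbx = e.reg .rdx := hcore.rbx
  have w_kept : RegsKept [.rsp] v v := RegsKept.refl _ _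
  have w_eq : Mem.EqOn ProgX.Base.L.textLo ProgX.Base.L.textHi u₀.mem v.mem := ProgX.Base.conv_code_eqOn hcore.code
  have hdf := (show abiInv _ from hcore.abi).1
  have hmx := (show abiInv _ from hcore.abi).2
  have hsse := ProgX.Base.sseOK_of_abiInv hcore.abi
  -- the report: at or above RA + 8, and live under the heap `H` with the own frame pushed (both BEFORE the walk)
  have hrab := gif_decode.report_above hpre
  have hrl : LiveIn (H.liveObjs ++ rest) (gif_decode.framesIn frames e) (e.reg .rdx).toNat 64 :=
    gif_decode.reportLive hpre H _ _ _ (Nat.le_refl _) (Nat.le_refl _)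
  -- 2. THE WALK, to the exit cut 0x10aeb3
  u_walk hcode [hμ.vendor] until [Gif.L.gif_decode.at_10aeb3] span [ProgX.Base.L.textLo, ProgX.Base.L.textHi] side (v_side)
  case check_10ade5 =>
    -- gif_driver.c:185: 4 bytes inside the report
    have hun : ShadowUntouched v.mem s_10ade5.mem := by v_untouched
    exact hrl.accSmall hinv.shadow hun _ 4 (by decide) (by u_omega) (by u_omega)
  case check_10adf4 =>
    -- gif_driver.c:186: 4 bytes inside the report
    have hun : ShadowUntouched v.mem s_10adf4.mem := by v_untouched
    exact hrl.accSmall hinv.shadow hun _ 4 (by decide) (by u_omega) (by u_omega)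
  case check_10ae04 =>
    -- gif_driver.c:187: 4 bytes inside the report
    have hun : ShadowUntouched v.mem s_10ae04.mem := by v_untouched
    exact hrl.accSmall hinv.shadow hun _ 4 (by decide) (by u_omega) (by u_omega)
  case check_10ae14 =>
    -- gif_driver.c:188: 4 bytes inside the report
    have hun : ShadowUntouched v.mem s_10ae14.mem := by v_untouched
    exact hrl.accSmall hinv.shadow hun _ 4 (by decide) (by u_omega) (by u_omega)
  case check_10ae24 =>
    -- gif_driver.c:189: 4 bytes inside the report
    have hun : ShadowUntouched v.mem s_10ae24.mem := by v_untouched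
    exact hrl.accSmall hinv.shadow hun _ 4 (by decide) (by u_omega) (by u_omega)
  case check_10ae34 =>
    -- gif_driver.c:190: 4 bytes inside the report
    have hun : ShadowUntouched v.mem s_10ae34.mem := by v_untouched
    exact hrl.accSmall hinv.shadow hun _ 4 (by decide) (by u_omega) (by u_omega)
  case check_10ae44 =>
    -- gif_driver.c:191: 4 bytes inside the report
    have hun : ShadowUntouched v.mem s_10ae44.mem := by v_untouched
    exact hrl.accSmall hinv.shadow hun _ 4 (by decide) (by u_omega) (by u_omega)
  case check_10ae54 =>
    -- gif_driver.c:192: 4 bytes inside the report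
    have hun : ShadowUntouched v.mem s_10ae54.mem := by v_untouched
    exact hrl.accSmall hinv.shadow hun _ 4 (by decide) (by u_omega) (by u_omega)
  case check_10ae64 =>
    -- gif_driver.c:193: 4 bytes inside the report
    have hun : ShadowUntouched v.mem s_10ae64.mem := by v_untouched
    exact hrl.accSmall hinv.shadow hun _ 4 (by decide) (by u_omega) (by u_omega)
  case check_10ae74 =>
    -- gif_driver.c:194: 4 bytes inside the report
    have hun : ShadowUntouched v.mem s_10ae74.mem := by v_untouched
    exact hrl.accSmall hinv.shadow hun _ 4 (by decide) (by u_omega) (by u_omega)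
  case check_10ae84 =>
    -- gif_driver.c:195: 8 bytes inside the report
    have hun : ShadowUntouched v.mem s_10ae84.mem := by v_untouched
    exact hrl.accSmall hinv.shadow hun _ 8 (by decide) (by u_omega) (by u_omega)
  case check_10ae95 =>
    -- gif_driver.c:196: 8 bytes inside the report
    have hun : ShadowUntouched v.mem s_10ae95.mem := by v_untouched
    exact hrl.accSmall hinv.shadow hun _ 8 (by decide) (by u_omega) (by u_omega)
  case check_10aea6 =>
    -- gif_driver.c:197: 8 bytes inside the report
    have hun : ShadowUntouched v.mem s_10aea6.mem := by v_untouched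
    exact hrl.accSmall hinv.shadow hun _ 8 (by decide) (by u_omega) (by u_omega)
  -- 0x10aeb3: THE REPORT IS FILLED. The 27 stores since `v`: `error` (RA − 88), thirteen return addresses of the check routines
  -- (RA − 144), thirteen fields of the report (a caller's stack object)
  have hs : Mem.SameExcept
      [⟨(e.reg .rsp).toNat - 992, (e.reg .rsp).toNat - 56⟩,
       ⟨(e.reg .rdx).toNat, (e.reg .rdx).toNat + 64⟩] v.mem s_10aeab.mem := by
    rw [w_mem]
    u_same
  -- both windows lie in the stack region: the heap's invariant holds on
  have hoff : ∀ w, w ∈ ([⟨(e.reg .rsp).toNat - 992, (e.reg .rsp).toNat - 56⟩,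
      ⟨(e.reg .rdx).toNat, (e.reg .rdx).toNat + 64⟩] : List Span) → 0x700000 ≤ w.lo ∧ w.hi ≤ 0x800000 := by
    intro w hw
    simp only [List.mem_cons, List.mem_nil_iff, or_false] at hw
    rcases hw with rfl | rfl
    · simp only
      omega
    · exact ⟨hrep_lo, hrep_hi⟩
  obtain ⟨hinv1, _⟩ := hinv.stack_windows hheap.base hs hoff
  -- both windows are the body's: `Core` holds on
  have hwin : ∀ x, x ∈ ([⟨(e.reg .rsp).toNat - 992, (e.reg .rsp).toNat - 56⟩,
      ⟨(e.reg .rdx).toNat, (e.reg .rdx).toNat + 64⟩] : List Span) → gif_decode.BodyWin e x := by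
    intro x hx
    simp only [List.mem_cons, List.mem_nil_iff, or_false] at hx
    unfold gif_decode.BodyWin
    rcases hx with rfl | rfl
    · left
      simp only
      omega
    · right
      right
      simp only
      omega
  have habi : (conv u₀).inv s_10aeab := by
    refine ProgX.Base.abiInv_of ?_ ?_
    · rw [w_flags]
      exact w_df_10aea6
    · rw [w_mxcsr]
      exact hmx
  have hcore' := hcore.carry (cut' := Gif.L.gif_decode.at_10aeb3) w_rip w_rsp (w_kept.get .r12 rfl) (w_kept.get .r13 rfl)
    (w_kept.get .rbx rfl) (w_kept.get .r15 rfl) hs hwin (ProgX.Base.conv_code_in w_eq) habi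
  refine ReachVia.done ?_
  exact {
    core := hcore'
    rbp := by
      rw [w_kept.get .rbp rfl]
      exact c_rbp
    inv := hinv1
  }

end Gif.Spec.gif_decode_1
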